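-- pv_equiv track=rewrite | github.com/meddhiabetis/portfolio | backend/app/api/v1/chat.py | _unique_snippets
-- ===== SOURCE A (Python) =====
-- from typing import List, Literal, Optional, Tuple, Set, Dict, Any
--
-- def _unique_snippets(snips: List[str], max_chars: int = 3500) -> List[str]:
--     seen: Set[str] = set()
--     out: List[str] = []
--     total = 0
--     for s in snips:
--         s2 = s.strip()
--         if not s2 or s2 in seen:
--             continue
--         if total + len(s2) > max_chars:
--             break
--         seen.add(s2)
--         out.append(s2)
--         total += len(s2)
--     return out
-- ===== SOURCE B (Python) =====
-- def _unique_snippets(snips, max_chars=3500):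
--     # Dedup the trimmed non-empty snippets (first occurrences, in order).
--     uniq = list(dict.fromkeys(t for s in snips if (t := s.strip())))
--     # Prefix sums of lengths; they are non-decreasing, so the set of cut
--     # points fitting the budget is a prefix: binary-search the largest one.
--     prefix = [0]
--     for t in uniq:
--         prefix.append(prefix[-1] + len(t))
--     lo, hi = 0, len(uniq)
--     while lo < hi:
--         mid = (lo + hi + 1) // 2
--         if prefix[mid] <= max_chars:
--             lo = mid
--         else:
--             hi = mid - 1
--     return uniq[:lo]
-- ===== Notes on version B (the rewrite author's own statement) =====
-- stated objective: alternative
-- what changed: Replaces A's fused greedy loop by dedup + prefix-sum array + a hand-written binary search for the largest cut point whose cumulative length fits the budget, returning a slice; correct because the prefix sums are non-decreasing, so the feasible cut points form a prefix.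
import Mathlib
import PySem

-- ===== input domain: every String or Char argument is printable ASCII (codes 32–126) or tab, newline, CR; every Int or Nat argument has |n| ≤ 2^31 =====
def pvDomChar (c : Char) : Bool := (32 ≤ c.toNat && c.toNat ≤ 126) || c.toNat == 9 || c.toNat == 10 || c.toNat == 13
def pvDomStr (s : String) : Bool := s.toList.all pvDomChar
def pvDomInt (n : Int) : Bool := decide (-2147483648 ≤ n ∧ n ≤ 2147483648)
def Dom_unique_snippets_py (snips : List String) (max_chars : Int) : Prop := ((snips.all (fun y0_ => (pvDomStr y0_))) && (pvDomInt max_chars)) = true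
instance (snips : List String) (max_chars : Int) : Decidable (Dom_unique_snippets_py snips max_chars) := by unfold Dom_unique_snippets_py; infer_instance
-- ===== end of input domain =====

-- B replaces A's fused greedy loop by dedup + prefix sums + binary search for the cut point (alternative algorithm, same cost).

-- ===== PORT A =====
-- A's single fused loop: state (seen, out, total); 'break' returns out.
def uniqueSnipsLoopA (rest : List String) (seen : PySem.Set String) (out : List String)
    (total : Int) (max_chars : Int) : List String :=
  match rest with
  | [] => out
  | s :: rest =>
      let s2 := PySem.Str.strip s
      if s2 == "" || PySem.Set.contains seen s2 then
        uniqueSnipsLoopA rest seen out total max_chars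
      else if total + PySem.Str.len s2 > max_chars then
        out
      else
        uniqueSnipsLoopA rest (PySem.Set.add seen s2) (out ++ [s2])
          (total + PySem.Str.len s2) max_chars

def unique_snippets_py (snips : List String) (max_chars : Int) : List String :=
  uniqueSnipsLoopA snips PySem.Set.empty [] 0 max_chars

-- ===== PORT B =====
-- prefix = [0]; for t in uniq: prefix.append(prefix[-1] + len(t))
def buildPrefix (uniq : List String) (p : List Int) : List Int :=
  match uniq with
  | [] => p
  | t :: rest => buildPrefix rest (p ++ [p.getLastD 0 + PySem.Str.len t])

-- while lo < hi: mid = (lo+hi+1)//2; if prefix[mid] <= max_chars: lo = mid else: hi = mid-1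
-- (prefix[mid] is always in range here — 1 ≤ mid ≤ len(uniq) < len(prefix) — so pyGet? is some; .getD 0 only unwraps it)
def bsearchCut (pref : List Int) (mc lo hi : Int) : Int :=
  if h : lo < hi then
    let mid := PySem.Int.floordiv (lo + hi + 1) 2
    if (PySem.List.pyGet? pref mid).getD 0 ≤ mc then bsearchCut pref mc mid hi
    else bsearchCut pref mc lo (mid - 1)
  else lo
termination_by (hi - lo).toNat
decreasing_by
  · have := PySem.Int.floordiv_two_mid_bounds (lo := lo + 1) (hi := hi) (by omega)
    have e : lo + 1 + hi = lo + hi + 1 := by ring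
    rw [e] at this; omega
  · have := PySem.Int.floordiv_two_mid_bounds (lo := lo + 1) (hi := hi) (by omega)
    have e : lo + 1 + hi = lo + hi + 1 := by ring
    rw [e] at this; omega

def unique_snippets_py_alt (snips : List String) (max_chars : Int) : List String :=
  -- uniq = list(dict.fromkeys(t for s in snips if (t := s.strip())))
  let uniq := PySem.List.dedup ((snips.map PySem.Str.strip).filter (fun t => !(t == "")))
  let pref := buildPrefix uniq [0]
  let lo := bsearchCut pref max_chars 0 (uniq.length : Int)
  PySem.List.slice uniq none (some lo)

-- ===== PRECONDITION & SPEC =====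
def Spec_unique_snippets_py (snips : List String) (max_chars : Int) (out : List String) : Prop := out = unique_snippets_py_alt snips max_chars
instance (snips : List String) (max_chars : Int) (out : List String) : Decidable (Spec_unique_snippets_py snips max_chars out) := by unfold Spec_unique_snippets_py; infer_instance

-- ===== CLAIM (what is proved, stated in full; the proofs are below) =====
def Claim_equal_unique_snippets_py : Prop := ∀ (snips : List String) (max_chars : Int), Dom_unique_snippets_py snips max_chars → Spec_unique_snippets_py snips max_chars (unique_snippets_py snips max_chars)

-- ===== LEMMAS AND PROOFS =====

-- Model of the budget truncation: take while the running total fits, break at the first overflow.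
def budgetTake (uniq : List String) (total : Int) (max_chars : Int) : List String :=
  match uniq with
  | [] => []
  | t :: rest =>
      if total + PySem.Str.len t > max_chars then []
      else t :: budgetTake rest (total + PySem.Str.len t) max_chars

-- The fresh trimmed non-empty snippets of `rest` not already in `seen`, first occurrences in order.
def freshSnips (seen : PySem.Set String) : List String → List String
  | [] => []
  | s :: rest =>
      let t := PySem.Str.strip s
      if t == "" || PySem.Set.contains seen t then freshSnips seen rest
      else t :: freshSnips (PySem.Set.add seen t) rest

lemma uniqueSnipsLoopA_eq (rest : List String) (seen : PySem.Set String) (out : List String)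
    (total max_chars : Int) :
    uniqueSnipsLoopA rest seen out total max_chars
      = out ++ budgetTake (freshSnips seen rest) total max_chars := by
  induction rest generalizing seen out total with
  | nil => simp [uniqueSnipsLoopA, freshSnips, budgetTake]
  | cons s rest ih =>
      by_cases hp : PySem.Str.strip s = "" ∨ PySem.Str.strip s ∈ seen
      · simp [uniqueSnipsLoopA, freshSnips, hp, ih]
      · by_cases hb : max_chars < total + ((PySem.Chars.strip s.toList).length : Int)
        · simp [uniqueSnipsLoopA, freshSnips, budgetTake, hp, hb]
        · simp [uniqueSnipsLoopA, freshSnips, budgetTake, hp, hb, ih]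

-- freshSnips over the raw list = a seeded dedup over the trimmed, filtered list.
def newOf (seen : PySem.Set String) : List String → List String
  | [] => []
  | t :: rest =>
      if PySem.Set.contains seen t then newOf seen rest
      else t :: newOf (PySem.Set.add seen t) rest

lemma freshSnips_eq_newOf (snips : List String) (seen : PySem.Set String) :
    freshSnips seen snips
      = newOf seen ((snips.map PySem.Str.strip).filter (fun t => !(t == ""))) := by
  induction snips generalizing seen with
  | nil => simp [freshSnips, newOf]
  | cons s rest ih =>
      by_cases he : PySem.Str.strip s = ""
      · simp [freshSnips, he, ih]
      · by_cases hc : PySem.Str.strip s ∈ seen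
        · simp [freshSnips, newOf, he, hc, ih]
        · simp [freshSnips, newOf, he, hc, ih]

lemma foldl_add_eq_append_newOf (ys : List String) (seen : PySem.Set String) :
    ys.foldl PySem.Set.add seen = seen ++ newOf seen ys := by
  induction ys generalizing seen with
  | nil => simp [newOf]
  | cons t rest ih =>
      by_cases hc : t ∈ seen
      · rw [List.foldl_cons, show PySem.Set.add seen t = seen from by simp [PySem.Set.add, hc]]
        simp [newOf, hc, ih]
      · rw [List.foldl_cons, ih (PySem.Set.add seen t),
          show PySem.Set.add seen t = seen ++ [t] from by simp [PySem.Set.add, hc]]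
        simp [newOf, hc]

lemma newOf_empty_eq_dedup (ys : List String) :
    newOf PySem.Set.empty ys = PySem.List.dedup ys := by
  have h := foldl_add_eq_append_newOf ys PySem.Set.empty
  rw [PySem.List.dedup_eq_ofList, PySem.Set.ofList_eq_foldl]
  simpa [PySem.Set.empty] using h.symm

-- ---- B side ----

-- Clean model of the prefix-sum list.
def myScan (a : Int) : List String → List Int
  | [] => [a]
  | t :: r => (a : Int) :: myScan (a + PySem.Str.len t) r

def sumLen (xs : List String) : Int := (xs.map PySem.Str.len).sum

lemma sumLen_nil : sumLen [] = 0 := rfl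

lemma sumLen_cons (t : String) (xs : List String) :
    sumLen (t :: xs) = PySem.Str.len t + sumLen xs := by
  simp [sumLen]

lemma buildPrefix_append (l : List String) (p : List Int) (a : Int) :
    buildPrefix l (p ++ [a]) = p ++ myScan a l := by
  induction l generalizing p a with
  | nil => simp [buildPrefix, myScan]
  | cons t r ih =>
      have hl : (p ++ [a]).getLastD 0 = a := by simp
      rw [buildPrefix, hl, show p ++ [a] ++ [a + PySem.Str.len t] = (p ++ [a]) ++ [a + PySem.Str.len t] from rfl,
        ih (p ++ [a]) (a + PySem.Str.len t)]
      simp [myScan]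

lemma buildPrefix_zero (l : List String) : buildPrefix l [0] = myScan 0 l := by
  simpa using buildPrefix_append l [] 0

lemma myScan_getD (l : List String) (a : Int) (k : Nat) (hk : k ≤ l.length) :
    (myScan a l).getD k 0 = a + sumLen (l.take k) := by
  induction l generalizing a k with
  | nil =>
      have : k = 0 := Nat.le_zero.mp hk
      subst this
      simp [myScan, sumLen]
  | cons t r ih =>
      cases k with
      | zero => simp [myScan, sumLen]
      | succ k =>
          simp only [myScan, List.getD_cons_succ]
          rw [ih (a + PySem.Str.len t) k (by simpa using hk), List.take_succ_cons, sumLen_cons]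
          ring

lemma sumLen_nonneg (xs : List String) : 0 ≤ sumLen xs := by
  apply List.sum_nonneg
  intro x hx
  obtain ⟨s, _, rfl⟩ := List.mem_map.mp hx
  simp [PySem.Str.len]

-- Number of snippets A keeps (the cut point).
def cutCount : List String → Int → Int → Nat
  | [], _, _ => 0
  | t :: r, total, mc =>
      if total + PySem.Str.len t > mc then 0 else cutCount r (total + PySem.Str.len t) mc + 1

lemma budgetTake_eq_take (l : List String) (total mc : Int) :
    budgetTake l total mc = l.take (cutCount l total mc) := by
  induction l generalizing total with
  | nil => simp [budgetTake, cutCount]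
  | cons t r ih =>
      simp only [budgetTake, cutCount]
      split_ifs with h
      · simp
      · simp [ih]

lemma cutCount_le_length (l : List String) (total mc : Int) : cutCount l total mc ≤ l.length := by
  induction l generalizing total with
  | nil => simp [cutCount]
  | cons t r ih =>
      simp only [cutCount, List.length_cons]
      split_ifs with h
      · omega
      · have := ih (total + PySem.Str.len t)
        omega

lemma cutCount_fits (l : List String) (total mc : Int) (k : Nat)
    (h1 : 1 ≤ k) (hk : k ≤ cutCount l total mc) :
    total + sumLen (l.take k) ≤ mc := by
  induction l generalizing total k with
  | nil => simp [cutCount] at hk; omega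
  | cons t r ih =>
      simp only [cutCount] at hk
      split_ifs at hk with h
      · omega
      · cases k with
        | zero => omega
        | succ k =>
            rw [List.take_succ_cons, sumLen_cons]
            rcases Nat.eq_zero_or_pos k with h0 | hpos
            · subst h0
              rw [List.take_zero, sumLen_nil]
              omega
            · have hrec := ih (total + PySem.Str.len t) k hpos (by omega)
              linarith

lemma cutCount_overflow (l : List String) (total mc : Int) (k : Nat)
    (hc : cutCount l total mc < k) (hk : k ≤ l.length) :
    mc < total + sumLen (l.take k) := by
  induction l generalizing total k with
  | nil => simp at hk; omega
  | cons t r ih =>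
      cases k with
      | zero => omega
      | succ k =>
          rw [List.take_succ_cons, sumLen_cons]
          simp only [cutCount] at hc
          split_ifs at hc with h
          · have hnn : 0 ≤ sumLen (r.take k) := sumLen_nonneg _
            linarith
          · have hrec := ih (total + PySem.Str.len t) k (by omega) (by simpa using hk)
            linarith

lemma bsearchCut_correct (l : List String) (mc : Int) (lo hi : Int)
    (hlo : 0 ≤ lo) (hloc : lo ≤ (cutCount l 0 mc : Int))
    (hchi : (cutCount l 0 mc : Int) ≤ hi) (hhi : hi ≤ (l.length : Int)) :
    bsearchCut (myScan 0 l) mc lo hi = (cutCount l 0 mc : Int) := by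
  by_cases hlt : lo < hi
  · have hmid := PySem.Int.floordiv_two_mid_bounds (lo := lo + 1) (hi := hi) (by omega)
    rw [show lo + 1 + hi = lo + hi + 1 from by ring] at hmid
    set mid := PySem.Int.floordiv (lo + hi + 1) 2 with hmiddef
    have h1 : lo + 1 ≤ mid := hmid.1
    have h2 : mid ≤ hi := hmid.2
    have hmidn : mid.toNat ≤ l.length := by omega
    have hval : (PySem.List.pyGet? (myScan 0 l) mid).getD 0 = sumLen (l.take mid.toNat) := by
      conv_lhs => rw [show mid = ((mid.toNat : Nat) : Int) from by omega]
      rw [PySem.List.pyGet?_natCast, ← List.getD_eq_getElem?_getD,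
        myScan_getD l 0 mid.toNat hmidn, zero_add]
    rw [bsearchCut, dif_pos hlt]
    show (if (PySem.List.pyGet? (myScan 0 l) mid).getD 0 ≤ mc then
        bsearchCut (myScan 0 l) mc mid hi
      else bsearchCut (myScan 0 l) mc lo (mid - 1)) = ((cutCount l 0 mc : Nat) : Int)
    rw [hval]
    by_cases hle : sumLen (l.take mid.toNat) ≤ mc
    · -- mid ≤ cutCount, else cutCount_overflow contradicts hle
      have hmc : mid ≤ (cutCount l 0 mc : Int) := by
        by_contra hgt
        have := cutCount_overflow l 0 mc mid.toNat (by omega) hmidn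
        omega
      rw [if_pos hle]
      exact bsearchCut_correct l mc mid hi (by omega) hmc hchi hhi
    · -- cutCount < mid, else cutCount_fits contradicts hle
      have hcm : (cutCount l 0 mc : Int) ≤ mid - 1 := by
        by_contra hgt
        have := cutCount_fits l 0 mc mid.toNat (by omega) (by omega)
        omega
      rw [if_neg hle]
      exact bsearchCut_correct l mc lo (mid - 1) hlo hloc hcm (by omega)
  · rw [bsearchCut, dif_neg hlt]; omega
termination_by (hi - lo).toNat
decreasing_by
  · omega
  · omega

-- ===== VERDICT (by name: the statement is the Claim_ definition above) =====
theorem unique_snippets_py_spec : Claim_equal_unique_snippets_py := by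
  intro snips max_chars _
  show unique_snippets_py snips max_chars = unique_snippets_py_alt snips max_chars
  have hA : unique_snippets_py snips max_chars
      = budgetTake (PySem.List.dedup ((snips.map PySem.Str.strip).filter (fun t => !(t == "")))) 0 max_chars := by
    unfold unique_snippets_py
    rw [uniqueSnipsLoopA_eq, freshSnips_eq_newOf, newOf_empty_eq_dedup, List.nil_append]
  have hB : unique_snippets_py_alt snips max_chars
      = PySem.List.slice (PySem.List.dedup ((snips.map PySem.Str.strip).filter (fun t => !(t == "")))) none
          (some (bsearchCut
            (buildPrefix (PySem.List.dedup ((snips.map PySem.Str.strip).filter (fun t => !(t == "")))) [0])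
            max_chars 0
            ((PySem.List.dedup ((snips.map PySem.Str.strip).filter (fun t => !(t == "")))).length : Int))) := rfl
  rw [hA, budgetTake_eq_take, hB, buildPrefix_zero,
    bsearchCut_correct _ max_chars 0 _ le_rfl (by exact_mod_cast Nat.zero_le _)
      (by exact_mod_cast cutCount_le_length _ 0 max_chars) le_rfl,
    PySem.List.slice_to_natCast]
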